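-- pv_equiv track=rewrite | github.com/IntegralDefense/ACE | lib/saq/modules/crits.py | is_subdomain
-- ===== SOURCE A (Python) =====
-- def is_subdomain(a, b):
--     """Returns True if a is equal to or a subdomain of b."""
--     if a is None or b is None or a == '' or b == '':
--         return False
--
--     if a == b:
--         return True
--
--     a_split = a.split('.')
--     a_split.reverse()
--
--     b_split = b.split('.')
--     b_split.reverse()
--
--     # b = evil.com [com, evil]
--     # a = malware.evil.com [com, evil, malware]
--
--     # b = google.com [com, google]
--     # a = malware.evil.com [com, evil, malware]
--
--     # b = su
--     # a = malware.evil.su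
--
--     # len(a) = 3
--     # len(b) = 2
--     # a[0] == b[0]
--     # a[1] == a[1]
--     # i = 2
--
--     i = 0
--     while True:
--         if a_split[i] != b_split[i]:
--             return False
--
--         i += 1
--         if i >= len(a_split):
--             return False
--
--         if i >= len(b_split):
--             return True
-- ===== SOURCE B (Python) =====
-- def is_subdomain(a, b):
--     """Returns True if a is equal to or a subdomain of b."""
--     if a is None or b is None or a == '' or b == '':
--         return False
--     if a == b:
--         return True
--     a_labels = a.split('.')
--     b_labels = b.split('.')
--     # a is a subdomain of b iff b's label list is a proper suffix of a's
--     return len(b_labels) < len(a_labels) and a_labels[-len(b_labels):] == b_labels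
-- ===== Notes on version B (the rewrite author's own statement) =====
-- stated objective: simpler
-- what changed: Replaces the reversed label lists and the manual index/exhaustion while-loop with a single proper-suffix comparison of the label lists (one slice equality).
import Mathlib
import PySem

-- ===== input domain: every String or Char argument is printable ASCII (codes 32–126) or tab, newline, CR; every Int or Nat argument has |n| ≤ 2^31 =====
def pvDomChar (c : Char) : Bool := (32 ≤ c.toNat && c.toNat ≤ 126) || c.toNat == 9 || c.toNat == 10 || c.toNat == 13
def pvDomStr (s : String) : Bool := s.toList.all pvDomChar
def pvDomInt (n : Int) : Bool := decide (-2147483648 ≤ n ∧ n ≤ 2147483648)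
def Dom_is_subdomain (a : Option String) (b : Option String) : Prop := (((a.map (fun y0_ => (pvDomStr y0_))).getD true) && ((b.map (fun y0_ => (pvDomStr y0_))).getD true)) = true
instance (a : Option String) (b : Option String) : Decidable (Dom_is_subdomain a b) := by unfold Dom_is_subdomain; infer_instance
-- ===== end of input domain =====

-- B replaces A's reversed label lists and manual index/exhaustion while-loop by a single
-- proper-suffix comparison of the label lists (objective: simpler).

-- ===== PORT A =====
-- A's 'while True' loop, on the already-reversed label lists, current index i
def loopA (as_ bs_ : List (List Char)) (i : Nat) : Bool :=
  if PySem.List.pyGet? as_ (i : Int) ≠ PySem.List.pyGet? bs_ (i : Int) then false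
  else if i + 1 ≥ as_.length then false
  else if i + 1 ≥ bs_.length then true
  else loopA as_ bs_ (i + 1)
termination_by as_.length - i
decreasing_by omega

def is_subdomain (a : Option String) (b : Option String) : Bool :=
  match a, b with
  | some sa, some sb =>
    if sa = "" || sb = "" then false
    else if sa = sb then true
    else
      let a_split := (PySem.Chars.splitOn sa.toList ['.']).reverse
      let b_split := (PySem.Chars.splitOn sb.toList ['.']).reverse
      loopA a_split b_split 0
  | _, _ => false

-- ===== PORT B =====
def is_subdomain_alt (a : Option String) (b : Option String) : Bool :=
  match a with
  | none => false
  | some sa =>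
    match b with
    | none => false
    | some sb =>
      if sa = "" || sb = "" then false
      else if sa = sb then true
      else
        let a_labels := PySem.Chars.splitOn sa.toList ['.']
        let b_labels := PySem.Chars.splitOn sb.toList ['.']
        decide (b_labels.length < a_labels.length) &&
          (PySem.List.slice a_labels (some (-(b_labels.length : Int))) none == b_labels)

-- ===== PRECONDITION & SPEC =====
def Spec_is_subdomain (a : Option String) (b : Option String) (out : Bool) : Prop := out = is_subdomain_alt a b
instance (a : Option String) (b : Option String) (out : Bool) : Decidable (Spec_is_subdomain a b out) := by unfold Spec_is_subdomain; infer_instance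

-- ===== CLAIM (what is proved, stated in full; the proofs are below) =====
def Claim_equal_is_subdomain : Prop := ∀ (a : Option String) (b : Option String), Dom_is_subdomain a b → Spec_is_subdomain a b (is_subdomain a b)

-- ===== LEMMAS AND PROOFS =====

-- Python's s.split(sep) never returns an empty list
lemma splitOn_go_ne_nil (sep : List Char) :
    ∀ (fuel : Nat) (l cur : List Char) (acc : List (List Char)),
    PySem.Chars.splitOn.go sep fuel l cur acc ≠ [] := by
  intro fuel
  induction fuel with
  | zero => intro l cur acc; simp [PySem.Chars.splitOn.go]
  | succ n ih =>
    intro l cur acc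
    match l with
    | [] => simp [PySem.Chars.splitOn.go]
    | c :: rest =>
      rw [PySem.Chars.splitOn.go]
      by_cases hp : sep.isPrefixOf (c :: rest) = true
      · simp only [if_pos hp]; exact ih _ _ _
      · simp only [if_neg hp]; exact ih _ _ _

-- Python's s.split(sep) never returns an empty list
lemma splitOn_ne_nil (cs sep : List Char) : PySem.Chars.splitOn cs sep ≠ [] := by
  unfold PySem.Chars.splitOn
  exact splitOn_go_ne_nil sep _ cs [] []

-- invariant of A's while-loop: from index i on, it decides "rb is strictly shorter than ra
-- and the entries of rb from index i on agree with those of ra"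
lemma loopA_spec (ra rb : List (List Char)) :
    ∀ i : Nat, i < ra.length → i < rb.length →
    loopA ra rb i =
      decide (rb.length < ra.length ∧ ∀ j : Nat, i ≤ j → j < rb.length → ra[j]? = rb[j]?) := by
  have main : ∀ n : Nat, ∀ i : Nat, ra.length - i ≤ n → i < ra.length → i < rb.length →
      loopA ra rb i =
        decide (rb.length < ra.length ∧ ∀ j : Nat, i ≤ j → j < rb.length → ra[j]? = rb[j]?) := by
    intro n
    induction n with
    | zero => intro i hn hia _; omega
    | succ n ih =>
      intro i hn hia hib
      rw [loopA]
      simp only [PySem.List.pyGet?_natCast]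
      by_cases hne : ra[i]? = rb[i]?
      · simp only [hne, ne_eq, not_true_eq_false, if_false]
        by_cases h1 : i + 1 ≥ ra.length
        · simp only [if_pos h1]
          symm; rw [decide_eq_false_iff_not]
          rintro ⟨hlt, -⟩; omega
        · simp only [if_neg h1]
          by_cases h2 : i + 1 ≥ rb.length
          · simp only [if_pos h2]
            symm; rw [decide_eq_true_eq]
            refine ⟨by omega, ?_⟩
            intro j hj1 hj2
            have : j = i := by omega
            subst this; exact hne
          · simp only [if_neg h2]
            rw [ih (i + 1) (by omega) (by omega) (by omega)]
            rw [decide_eq_decide]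
            constructor
            · rintro ⟨hlt2, hall⟩
              refine ⟨hlt2, fun j hj1 hj2 => ?_⟩
              rcases Nat.eq_or_lt_of_le hj1 with h | h
              · subst h; exact hne
              · exact hall j (by omega) hj2
            · rintro ⟨hlt2, hall⟩
              exact ⟨hlt2, fun j hj1 hj2 => hall j (by omega) hj2⟩
      · simp only [hne, ne_eq, not_false_eq_true, if_true]
        symm; rw [decide_eq_false_iff_not]
        rintro ⟨-, hall⟩
        exact hne (hall i (le_refl i) hib)
  intro i hia hib
  exact main (ra.length - i) i (le_refl _) hia hib

-- a prefix test by pointwise optional lookups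
lemma prefix_iff_forall_getElem? (l1 l2 : List (List Char)) (h : l1.length ≤ l2.length) :
    (∀ j : Nat, j < l1.length → l2[j]? = l1[j]?) ↔ l1 <+: l2 := by
  rw [List.prefix_iff_eq_take]
  constructor
  · intro hall
    apply List.ext_getElem?
    intro j
    by_cases hj : j < l1.length
    · rw [List.getElem?_take_of_lt hj, hall j hj]
    · rw [List.getElem?_eq_none (by omega), List.getElem?_eq_none]
      simp only [List.length_take]
      omega
  · intro heq j hj
    conv_rhs => rw [heq]
    rw [List.getElem?_take_of_lt hj]

-- the loop on the REVERSED lists computes B's proper-suffix test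
lemma loop_eq_suffix_test (la lb : List (List Char)) (ha : la ≠ []) (hb : lb ≠ []) :
    loopA la.reverse lb.reverse 0 =
      (decide (lb.length < la.length) && (la.drop (la.length - lb.length) == lb)) := by
  rw [loopA_spec la.reverse lb.reverse 0
      (by simpa using List.length_pos_iff.mpr ha)
      (by simpa using List.length_pos_iff.mpr hb)]
  simp only [List.length_reverse]
  by_cases hlt : lb.length < la.length
  · have hiff : (∀ j : Nat, 0 ≤ j → j < lb.length → la.reverse[j]? = lb.reverse[j]?) ↔
        la.drop (la.length - lb.length) = lb := by
      have h1 : (∀ j : Nat, 0 ≤ j → j < lb.length → la.reverse[j]? = lb.reverse[j]?) ↔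
          lb.reverse <+: la.reverse := by
        rw [← prefix_iff_forall_getElem? lb.reverse la.reverse (by simp; omega)]
        simp only [List.length_reverse]
        constructor
        · intro hall j hj; exact hall j (Nat.zero_le j) hj
        · intro hall j _ hj; exact hall j hj
      rw [h1, List.reverse_prefix, List.suffix_iff_eq_drop, eq_comm]
    have hbeq : (la.drop (la.length - lb.length) == lb) = decide (la.drop (la.length - lb.length) = lb) := by
      by_cases h : la.drop (la.length - lb.length) = lb <;> simp [h]
    rw [hbeq, ← Bool.decide_and, decide_eq_decide]
    constructor
    · rintro ⟨h1, h2⟩; exact ⟨h1, hiff.mp h2⟩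
    · rintro ⟨h1, h2⟩; exact ⟨h1, hiff.mpr h2⟩
  · have hbeq : (la.drop (la.length - lb.length) == lb) = decide (la.drop (la.length - lb.length) = lb) := by
      by_cases h : la.drop (la.length - lb.length) = lb <;> simp [h]
    rw [hbeq, ← Bool.decide_and, decide_eq_decide]
    constructor
    · rintro ⟨h1, -⟩; exact absurd h1 hlt
    · rintro ⟨h1, -⟩; exact absurd h1 hlt

-- ===== VERDICT (by name: the statement is the Claim_ definition above) =====
theorem is_subdomain_spec : Claim_equal_is_subdomain := by
  intro a b _
  unfold Spec_is_subdomain is_subdomain is_subdomain_alt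
  match a, b with
  | none, _ => rfl
  | some _, none => rfl
  | some sa, some sb =>
    simp only []
    by_cases h0 : sa = "" || sb = ""
    · rw [if_pos h0, if_pos h0]
    · rw [if_neg h0, if_neg h0]
      by_cases heq : sa = sb
      · rw [if_pos heq, if_pos heq]
      · rw [if_neg heq, if_neg heq]
        have hk : 0 < (PySem.Chars.splitOn sb.toList ['.']).length :=
          List.length_pos_iff.mpr (splitOn_ne_nil _ _)
        rw [PySem.List.slice_from_neg_natCast _ _ hk]
        exact loop_eq_suffix_test _ _ (splitOn_ne_nil _ _) (splitOn_ne_nil _ _)
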